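-- pv_equiv track=rewrite | github.com/ENFStudios/mister-companion-macos | core/update_all_config.py | handle_simple_section
-- ===== SOURCE A (Python) =====
-- def remove_section_from_lines(lines, section):
--     new_lines = []
--     skip = False
--
--     for line in lines:
--         stripped = line.strip()
--
--         if stripped.startswith("[") and stripped.endswith("]"):
--             skip = stripped.strip("[]") == section
--
--         if not skip:
--             new_lines.append(line)
--
--     return new_lines
--
-- def handle_simple_section(section, enabled, lines, content_lines):
--     lines = remove_section_from_lines(lines, section)
--
--     while lines and not lines[0].strip():
--         lines.pop(0)
--
--     while lines and not lines[-1].strip():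
--         lines.pop()
--
--     if enabled:
--         if lines:
--             lines += [""] + content_lines
--         else:
--             lines += content_lines
--
--     return lines
-- ===== SOURCE B (Python) =====
-- def handle_simple_section(section, enabled, lines, content_lines):
--     def is_header(line):
--         s = line.strip()
--         return s.startswith("[") and s.endswith("]")
--
--     # Parse into preamble + ordered (name, chunk) sections, then rebuild
--     # without the matched section.
--     n = len(lines)
--     i = 0
--     kept = []
--     while i < n and not is_header(lines[i]):
--         kept.append(lines[i])
--         i += 1
--     while i < n:
--         name = lines[i].strip().strip("[]")
--         j = i + 1
--         while j < n and not is_header(lines[j]):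
--             j += 1
--         if name != section:
--             kept.extend(lines[i:j])
--         i = j
--
--     # Trim blanks by slicing between first and last non-blank index.
--     idx = [k for k, ln in enumerate(kept) if ln.strip()]
--     kept = kept[idx[0]:idx[-1] + 1] if idx else []
--
--     if enabled:
--         kept = kept + ([""] if kept else []) + content_lines
--     return kept
-- ===== Notes on version B (the rewrite author's own statement) =====
-- stated objective: alternative
-- what changed: B parses the file into a preamble plus header-led section chunks and rebuilds it without the matched section (instead of A's streaming skip-flag pass), and trims blank edges by slicing between the first and last non-blank index (instead of A's two pop loops).
import Mathlib
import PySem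

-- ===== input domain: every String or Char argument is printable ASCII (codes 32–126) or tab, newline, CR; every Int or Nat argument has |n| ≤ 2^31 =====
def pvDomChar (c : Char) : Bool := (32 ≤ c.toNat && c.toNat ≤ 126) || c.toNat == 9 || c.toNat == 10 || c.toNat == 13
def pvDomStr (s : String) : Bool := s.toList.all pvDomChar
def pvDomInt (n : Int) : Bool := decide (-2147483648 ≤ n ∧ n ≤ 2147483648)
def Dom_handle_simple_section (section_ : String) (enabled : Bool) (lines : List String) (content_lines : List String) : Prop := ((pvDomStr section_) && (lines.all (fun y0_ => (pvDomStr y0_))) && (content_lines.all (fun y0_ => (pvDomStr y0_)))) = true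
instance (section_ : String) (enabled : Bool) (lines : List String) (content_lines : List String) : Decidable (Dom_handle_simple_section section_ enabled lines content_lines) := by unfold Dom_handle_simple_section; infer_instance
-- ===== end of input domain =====

-- B re-parses the config into preamble + (name, chunk) sections and rebuilds without the
-- matched section, then trims by slicing between the first and last non-blank index
-- (objective: alternative decomposition, same cost).

-- ===== PORT A =====
-- helper of A: streaming pass with a 'skip' flag
def remove_section_from_lines (lines : List String) (section_ : String) : List String :=
  (lines.foldl (fun (st : List String × Bool) line =>
      let stripped := PySem.Str.strip line
      let skip :=
        if PySem.Str.startswith stripped "[" && PySem.Str.endswith stripped "]" then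
          PySem.Str.stripChars stripped "[]" == section_
        else st.2
      (if skip then st.1 else st.1 ++ [line], skip))
    ([], false)).1

-- A's `while lines and not lines[0].strip(): lines.pop(0)`
def pvTrimStartA : List String → List String
  | [] => []
  | x :: xs => if PySem.Str.strip x == "" then pvTrimStartA xs else x :: xs

-- A's `while lines and not lines[-1].strip(): lines.pop()`
def pvTrimEndA (l : List String) : List String :=
  if h : l = [] then l
  else if PySem.Str.strip (l.getLast h) == "" then pvTrimEndA l.dropLast else l
termination_by l.length
decreasing_by
  have : l.length ≠ 0 := fun hl => h (List.eq_nil_of_length_eq_zero hl)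
  simp [List.length_dropLast]; omega

def handle_simple_section (section_ : String) (enabled : Bool) (lines : List String) (content_lines : List String) : List String :=
  let lines1 := remove_section_from_lines lines section_
  let lines2 := pvTrimEndA (pvTrimStartA lines1)
  if enabled then
    if lines2 ≠ [] then lines2 ++ ([""] ++ content_lines)
    else lines2 ++ content_lines
  else lines2

-- ===== PORT B =====
def pvIsHeader (line : String) : Bool :=
  let s := PySem.Str.strip line
  PySem.Str.startswith s "[" && PySem.Str.endswith s "]"

-- Source B's outer while loop: each step consumes one header-led chunk lines[i:j]
def pvSectionsB (section_ : String) : List String → List String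
  | [] => []
  | h :: rest =>
    let name := PySem.Str.stripChars (PySem.Str.strip h) "[]"
    let body := rest.takeWhile (fun l => !pvIsHeader l)
    let rest' := rest.dropWhile (fun l => !pvIsHeader l)
    (if name ≠ section_ then h :: body else []) ++ pvSectionsB section_ rest'
termination_by l => l.length
decreasing_by
  simp only [List.length_cons]
  have := List.length_dropWhile_le (fun l => !pvIsHeader l) rest
  omega

def handle_simple_section_alt (section_ : String) (enabled : Bool) (lines : List String) (content_lines : List String) : List String :=
  let kept := lines.takeWhile (fun l => !pvIsHeader l)
      ++ pvSectionsB section_ (lines.dropWhile (fun l => !pvIsHeader l))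
  let idx := ((PySem.List.enumerate kept).filter
      (fun p => PySem.Str.strip p.2 != "")).map Prod.fst
  let kept2 :=
    if h : idx = [] then []
    else PySem.List.slice kept (some (idx.head h)) (some (idx.getLast h + 1))
  if enabled then
    kept2 ++ (if kept2 ≠ [] then [""] else []) ++ content_lines
  else kept2

-- ===== PRECONDITION & SPEC =====
def Spec_handle_simple_section (section_ : String) (enabled : Bool) (lines : List String) (content_lines : List String) (out : List String) : Prop := out = handle_simple_section_alt section_ enabled lines content_lines
instance (section_ : String) (enabled : Bool) (lines : List String) (content_lines : List String) (out : List String) : Decidable (Spec_handle_simple_section section_ enabled lines content_lines out) := by unfold Spec_handle_simple_section; infer_instance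

-- ===== CLAIM (what is proved, stated in full; the proofs are below) =====
def Claim_equal_handle_simple_section : Prop := ∀ (section_ : String) (enabled : Bool) (lines : List String) (content_lines : List String), Dom_handle_simple_section section_ enabled lines content_lines → Spec_handle_simple_section section_ enabled lines content_lines (handle_simple_section section_ enabled lines content_lines)

-- ===== LEMMAS AND PROOFS =====

-- blank-line test used throughout the proofs
def pvBlank (s : String) : Bool := PySem.Str.strip s == ""

-- cons-shaped reformulation of A's fold
def pvRemAux (section_ : String) : List String → Bool → List String
  | [], _ => []
  | l :: ls, skip =>
    let stripped := PySem.Str.strip l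
    let skip' :=
      if PySem.Str.startswith stripped "[" && PySem.Str.endswith stripped "]" then
        PySem.Str.stripChars stripped "[]" == section_
      else skip
    (if skip' then [] else [l]) ++ pvRemAux section_ ls skip'

theorem pvFoldl_remAux (section_ : String) (ls : List String) (acc : List String) (skip : Bool) :
    (ls.foldl (fun (st : List String × Bool) line =>
      let stripped := PySem.Str.strip line
      let sk :=
        if PySem.Str.startswith stripped "[" && PySem.Str.endswith stripped "]" then
          PySem.Str.stripChars stripped "[]" == section_
        else st.2
      (if sk then st.1 else st.1 ++ [line], sk)) (acc, skip)).1
      = acc ++ pvRemAux section_ ls skip := by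
  induction ls generalizing acc skip with
  | nil => simp [pvRemAux]
  | cons l ls ih =>
    cases hb : (if PySem.Str.startswith (PySem.Str.strip l) "[" && PySem.Str.endswith (PySem.Str.strip l) "]" then
        (PySem.Str.stripChars (PySem.Str.strip l) "[]" == section_) else skip) with
    | false =>
      simp only [List.foldl_cons, pvRemAux, hb]
      simpa using ih (acc ++ [l]) false
    | true =>
      simp only [List.foldl_cons, pvRemAux, hb]
      simpa using ih acc true

theorem pvRemove_eq (section_ : String) (lines : List String) :
    remove_section_from_lines lines section_ = pvRemAux section_ lines false := by
  simpa [remove_section_from_lines] using pvFoldl_remAux section_ lines [] false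

-- the grouped (sections) view of the skip-flag pass
theorem pvRemAux_sections (section_ : String) (ls : List String) (skip : Bool) :
    pvRemAux section_ ls skip
      = (if skip then [] else ls.takeWhile (fun l => !pvIsHeader l))
        ++ pvSectionsB section_ (ls.dropWhile (fun l => !pvIsHeader l)) := by
  induction ls generalizing skip with
  | nil => simp [pvRemAux, pvSectionsB]
  | cons l ls ih =>
    by_cases hl : pvIsHeader l
    · have hts : (l :: ls).takeWhile (fun l => !pvIsHeader l) = [] := by
        simp [hl]
      have hds : (l :: ls).dropWhile (fun l => !pvIsHeader l) = l :: ls := by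
        simp [hl]
      rw [hts, hds]
      simp only [pvRemAux, pvSectionsB]
      have hhead : (PySem.Str.startswith (PySem.Str.strip l) "["
          && PySem.Str.endswith (PySem.Str.strip l) "]") = true := by
        simpa [pvIsHeader] using hl
      rw [if_pos hhead, ih]
      by_cases hn : PySem.Str.stripChars (PySem.Str.strip l) "[]" = section_
      · simp [hn]
      · simp [hn]
    · have hhead : (PySem.Str.startswith (PySem.Str.strip l) "["
          && PySem.Str.endswith (PySem.Str.strip l) "]") = false := by
        simpa [pvIsHeader] using hl
      have hts : (l :: ls).takeWhile (fun l => !pvIsHeader l)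
          = l :: ls.takeWhile (fun l => !pvIsHeader l) := by
        simp [hl]
      have hds : (l :: ls).dropWhile (fun l => !pvIsHeader l)
          = ls.dropWhile (fun l => !pvIsHeader l) := by
        simp [hl]
      rw [hts, hds]
      simp only [pvRemAux, hhead]
      rw [ih]
      cases skip <;> simp

-- characterizations of A's two trim loops
theorem pvTrimStartA_eq (l : List String) : pvTrimStartA l = l.dropWhile pvBlank := by
  induction l with
  | nil => rfl
  | cons x xs ih =>
    simp only [pvTrimStartA, List.dropWhile_cons, pvBlank]
    split_ifs with h <;> simp_all

theorem pvTrimEndA_eq (l : List String) :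
    pvTrimEndA l = (l.reverse.dropWhile pvBlank).reverse := by
  induction l using pvTrimEndA.induct with
  | case1 => simp [pvTrimEndA]
  | case2 l h hb ih =>
    rw [pvTrimEndA]
    simp only [dif_neg h, if_pos hb]
    rw [ih]
    have : l.reverse = l.getLast h :: l.dropLast.reverse := by
      conv_lhs => rw [← List.dropLast_append_getLast h]
      simp
    rw [this, List.dropWhile_cons]
    simp [pvBlank, hb]
  | case3 l h hb =>
    rw [pvTrimEndA]
    simp only [dif_neg h, if_neg hb]
    have : l.reverse = l.getLast h :: l.dropLast.reverse := by
      conv_lhs => rw [← List.dropLast_append_getLast h]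
      simp
    rw [this, List.dropWhile_cons]
    simp only [pvBlank] at hb ⊢
    rw [if_neg hb]
    simpa using (List.dropLast_append_getLast h).symm

theorem pvFilter_enum_blank (k : List String) (s : Int) (hall : ∀ x ∈ k, pvBlank x) :
    (PySem.List.enumerate k s).filter (fun p => PySem.Str.strip p.2 != "") = [] := by
  induction k generalizing s with
  | nil => simp [PySem.List.enumerate_nil]
  | cons x xs ih =>
    have hx := hall x (by simp)
    simp only [PySem.List.enumerate_cons, List.filter_cons]
    have : (PySem.Str.strip x != "") = false := by
      simp only [pvBlank, beq_iff_eq] at hx; simp [hx]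
    rw [this]
    exact ih _ (fun y hy => hall y (by simp [hy]))

theorem pvIdxE_append (a b : List String) (s : Int) :
    ((PySem.List.enumerate (a ++ b) s).filter (fun p => PySem.Str.strip p.2 != "")).map Prod.fst
    = ((PySem.List.enumerate a s).filter (fun p => PySem.Str.strip p.2 != "")).map Prod.fst
      ++ ((PySem.List.enumerate b (s + a.length)).filter (fun p => PySem.Str.strip p.2 != "")).map Prod.fst := by
  rw [PySem.List.enumerate_append]; simp

-- the index list of a block of all-blank lines is empty
theorem pvIdxE_blank (k : List String) (s : Int) (hall : ∀ x ∈ k, pvBlank x) :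
    ((PySem.List.enumerate k s).filter (fun p => PySem.Str.strip p.2 != "")).map Prod.fst = [] := by
  rw [pvFilter_enum_blank k s hall]; rfl

-- the trimmed middle: B's slice equals A's two-sided trim
theorem pvTrim_eq (k : List String) (idx : List Int)
    (hidxdef : idx = ((PySem.List.enumerate k).filter (fun p => PySem.Str.strip p.2 != "")).map Prod.fst) :
    (if h : idx = [] then ([] : List String)
     else PySem.List.slice k (some (idx.head h)) (some (idx.getLast h + 1)))
    = ((k.dropWhile pvBlank).reverse.dropWhile pvBlank).reverse := by
  by_cases hr : k.dropWhile pvBlank = []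
  · have hall : ∀ x ∈ k, pvBlank x := by
      intro x hx
      have hk := List.takeWhile_append_dropWhile (p := pvBlank) (l := k)
      rw [hr, List.append_nil] at hk
      exact List.mem_takeWhile_imp (by rw [hk]; exact hx)
    rw [dif_pos (by rw [hidxdef]; exact pvIdxE_blank k 0 hall), hr]
    simp
  · -- decompose k = u ++ (m ++ v), u and v all blank, m nonempty with nonblank ends
    have hu : k = k.takeWhile pvBlank ++ k.dropWhile pvBlank :=
      (List.takeWhile_append_dropWhile).symm
    have hmv : k.dropWhile pvBlank
        = ((k.dropWhile pvBlank).reverse.dropWhile pvBlank).reverse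
          ++ ((k.dropWhile pvBlank).reverse.takeWhile pvBlank).reverse := by
      conv_lhs => rw [← List.reverse_reverse (k.dropWhile pvBlank),
        ← List.takeWhile_append_dropWhile (p := pvBlank) (l := (k.dropWhile pvBlank).reverse)]
      rw [List.reverse_append]
    set u := k.takeWhile pvBlank with hudef
    set m := ((k.dropWhile pvBlank).reverse.dropWhile pvBlank).reverse with hmdef
    set v := ((k.dropWhile pvBlank).reverse.takeWhile pvBlank).reverse with hvdef
    have hallu : ∀ x ∈ u, pvBlank x := fun x hx => List.mem_takeWhile_imp hx
    have hallv : ∀ x ∈ v, pvBlank x := by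
      intro x hx
      rw [hvdef, List.mem_reverse] at hx
      exact List.mem_takeWhile_imp hx
    have hmne : m ≠ [] := by
      intro hm
      have hallr : ∀ x ∈ k.dropWhile pvBlank, pvBlank x := by
        intro x hx
        rw [hmv, hm, List.nil_append] at hx
        exact hallv _ hx
      have h1 := hallr _ (List.head_mem hr)
      rw [List.head_dropWhile_not pvBlank hr] at h1
      cases h1
    -- head of m is not blank
    have hheadm : pvBlank (m.head hmne) = false := by
      have e : m.head hmne = (k.dropWhile pvBlank).head hr := by
        have h1 : (k.dropWhile pvBlank).head? = some ((k.dropWhile pvBlank).head hr) :=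
          List.head?_eq_some_head hr
        have h2 : (k.dropWhile pvBlank).head? = some (m.head hmne) := by
          rw [hmv, List.head?_append, List.head?_eq_some_head hmne]; rfl
        rw [h1] at h2
        exact (Option.some.inj h2).symm
      rw [e]
      exact List.head_dropWhile_not pvBlank hr
    -- last of m is not blank
    have hrevne : (k.dropWhile pvBlank).reverse.dropWhile pvBlank ≠ [] := by
      intro hc
      apply hmne; rw [hmdef, hc]; rfl
    have hlastm : pvBlank (m.getLast hmne) = false := by
      have e : m.getLast hmne = ((k.dropWhile pvBlank).reverse.dropWhile pvBlank).head hrevne := by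
        have h1 : m.getLast? = some (m.getLast hmne) := List.getLast?_eq_some_getLast hmne
        have h3 : m.getLast? = ((k.dropWhile pvBlank).reverse.dropWhile pvBlank).head? := by
          rw [hmdef, List.getLast?_reverse]
        rw [h3, List.head?_eq_some_head hrevne] at h1
        exact (Option.some.inj h1).symm
      rw [e]
      exact List.head_dropWhile_not pvBlank hrevne
    -- k decomposed
    have hk : k = u ++ (m ++ v) := by rw [hu, hmv]
    -- the index list
    obtain ⟨x, t, hxt⟩ := List.exists_cons_of_ne_nil hmne
    have hxblank : pvBlank x = false := by
      have : m.head hmne = x := by simp [hxt]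
      rwa [this] at hheadm
    have hidx : idx
        = ((PySem.List.enumerate m (u.length : Int)).filter (fun p => PySem.Str.strip p.2 != "")).map Prod.fst := by
      rw [hidxdef]
      conv_lhs => rw [hk]
      rw [show PySem.List.enumerate (u ++ (m ++ v)) = PySem.List.enumerate (u ++ (m ++ v)) 0 from rfl,
        pvIdxE_append, pvIdxE_append, pvIdxE_blank u 0 hallu,
        pvIdxE_blank v _ hallv]
      simp
    -- head of idx
    have hx' : (PySem.Str.strip x != "") = true := by
      simp only [pvBlank] at hxblank
      simp [bne, hxblank]
    have hidxcons : idx = (u.length : Int) ::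
        ((PySem.List.enumerate t ((u.length : Int) + 1)).filter (fun p => PySem.Str.strip p.2 != "")).map Prod.fst := by
      rw [hidx, hxt, PySem.List.enumerate_cons, List.filter_cons]
      simp [hx']
    have hne : idx ≠ [] := by rw [hidxcons]; exact List.cons_ne_nil _ _
    -- last of idx
    have hlast? : idx.getLast? = some ((u.length : Int) + m.length - 1) := by
      rw [hidx]
      conv_lhs => rw [← List.dropLast_append_getLast hmne]
      rw [PySem.List.enumerate_append, List.filter_append, List.map_append]
      have hy' : (PySem.Str.strip (m.getLast hmne) != "") = true := by
        simp only [pvBlank] at hlastm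
        simp [bne, hlastm]
      have h1 : ((PySem.List.enumerate [m.getLast hmne] ((u.length : Int) + m.dropLast.length)).filter
          (fun p => PySem.Str.strip p.2 != "")).map Prod.fst = [(u.length : Int) + m.dropLast.length] := by
        rw [PySem.List.enumerate_cons, PySem.List.enumerate_nil, List.filter_cons]
        simp [hy']
      rw [h1, List.getLast?_concat]
      have hpos : 1 ≤ m.length := List.length_pos_iff.mpr hmne
      exact congrArg some (by simp only [List.length_dropLast]; omega)
    have hlast : ∀ h' : idx ≠ [], idx.getLast h' = (u.length : Int) + m.length - 1 := by
      intro h'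
      have h1 := List.getLast?_eq_some_getLast h'
      rw [hlast?] at h1
      exact (Option.some.inj h1).symm
    have hhead : ∀ h' : idx ≠ [], idx.head h' = (u.length : Int) := by
      intro h'
      have h1 := List.head?_eq_some_head h'
      have h2 : idx.head? = some (u.length : Int) := by rw [hidxcons]; rfl
      rw [h2] at h1
      exact (Option.some.inj h1).symm
    split
    · exact absurd (by assumption) hne
    · rename_i h'
      rw [hhead h', hlast h']
      have harith : ((u.length : Int) + m.length - 1 + 1) = (u.length : Int) + (m.length : Int) := by ring
      rw [harith, PySem.List.slice_natCast_add]
      conv_lhs => rw [hk]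
      rw [List.drop_left, List.take_left]

-- ===== VERDICT (by name: the statement is the Claim_ definition above) =====
theorem handle_simple_section_spec : Claim_equal_handle_simple_section := by
  intro section_ enabled lines content_lines _
  unfold Spec_handle_simple_section
  simp only [handle_simple_section, handle_simple_section_alt]
  rw [pvRemove_eq, pvRemAux_sections, pvTrimStartA_eq, pvTrimEndA_eq,
    pvTrim_eq _ _ rfl]
  simp only [Bool.false_eq_true, if_false]
  generalize (List.dropWhile pvBlank
      (List.dropWhile pvBlank
          (List.takeWhile (fun l => !pvIsHeader l) lines ++
            pvSectionsB section_ (List.dropWhile (fun l => !pvIsHeader l) lines))).reverse).reverse = R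
  cases enabled
  · simp
  · by_cases hR : R = [] <;> simp [hR]
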